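-- pv_equiv track=rewrite | github.com/opallab/graphalgosimulation | ltfs/utils.py | reference_bfs
-- ===== SOURCE A (Python) =====
-- from collections import deque
--
-- def reference_bfs(adj_matrix, root):
--     # Number of nodes in the graph
--     num_nodes = len(adj_matrix)
--
--     # Initialize parent as itself
--     parent = list(range(num_nodes))
--
--     # Create a queue for BFS
--     queue = deque()
--
--     # Mark the root as its own parent
--     parent[root] = root
--     reached = [False] * num_nodes
--
--     # Enqueue the root node
--     queue.append(root)
--
--     while queue:
--         # Dequeue a node from the queue
--         current_node = queue.popleft()
--         reached[current_node] = True
--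
--         # Visit all adjacent nodes of the current node
--         for neighbor in range(num_nodes):
--             if adj_matrix[current_node][neighbor] == 1 and not reached[neighbor]:
--                 # Mark the neighbor as visited and set its parent
--                 reached[neighbor] = True
--                 parent[neighbor] = current_node
--                 queue.append(neighbor)
--
--     return parent
-- ===== SOURCE B (Python) =====
-- def reference_bfs(adj_matrix, root):
--     # Two staged passes per round: index each new node's first discoverer in a dict,
--     # then commit parents in (discoverer position, node index) order; no queue, no
--     # mutation of the visited flags while scanning.
--     num_nodes = len(adj_matrix)
--     parent = list(range(num_nodes))
--     parent[root] = root
--     discovered = [False] * num_nodes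
--     discovered[root] = True
--     level = [root]
--     while level:
--         # pass 1: for every undiscovered node, the position in `level` of its
--         # first discoverer (smallest position of an adjacent level node)
--         disc = {}
--         for i, u in enumerate(level):
--             for v in range(num_nodes):
--                 if adj_matrix[u][v] == 1 and not discovered[v] and v not in disc:
--                     disc[v] = i
--         # pass 2: commit the round, counting-sort style by discoverer position
--         nxt = []
--         for i, u in enumerate(level):
--             for v in range(num_nodes):
--                 if disc.get(v) == i:
--                     discovered[v] = True
--                     parent[v] = u
--                     nxt.append(v)
--         level = nxt
--     return parent
-- ===== Notes on version B (the rewrite author's own statement) =====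
-- stated objective: alternative
-- what changed: Replaces the mutating FIFO-queue BFS by a staged round algorithm: per round it first builds a dict mapping every newly reachable node to the position of its first discoverer (visited flags untouched while scanning), then a second counting-sort-style pass commits parents and the next round in (discoverer position, node index) order, which is exactly the FIFO discovery order.
-- outside the precondition, e.g. on reference_bfs([[0, 0], [0]], 0): A returns [0, 1], B returns [0, 1]
import Mathlib
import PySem

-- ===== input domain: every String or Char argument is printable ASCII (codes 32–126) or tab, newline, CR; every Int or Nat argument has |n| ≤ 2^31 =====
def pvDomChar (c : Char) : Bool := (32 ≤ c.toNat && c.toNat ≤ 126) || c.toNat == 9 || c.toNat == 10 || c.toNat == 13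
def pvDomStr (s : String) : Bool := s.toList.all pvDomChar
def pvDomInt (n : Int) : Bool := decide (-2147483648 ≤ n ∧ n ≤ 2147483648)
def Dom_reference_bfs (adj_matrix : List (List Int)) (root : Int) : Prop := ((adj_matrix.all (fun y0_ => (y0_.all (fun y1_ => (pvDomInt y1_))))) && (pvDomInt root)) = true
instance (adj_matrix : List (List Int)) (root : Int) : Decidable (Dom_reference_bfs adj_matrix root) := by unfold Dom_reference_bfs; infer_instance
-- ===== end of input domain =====

-- B replaces the mutating FIFO-queue BFS by staged rounds: a first pass indexes every newly
-- reachable node by the position of its first discoverer in a dict (no flag mutation while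
-- scanning), a second counting-sort-style pass commits parents; same parent tree, same cost.

-- ===== PORT A =====
-- inner loop body of A: if adj[cur][nb] == 1 and not reached[nb]: mark, set parent, append nb
def bfsNeighStep (adj_matrix : List (List Int)) (cur : Int)
    (st : List Int × List Bool × List Int) (nb : Int) : List Int × List Bool × List Int :=
  if PySem.List.pyGetD (PySem.List.pyGetD adj_matrix cur []) nb 0 == 1
      && !(PySem.List.pyGetD st.2.1 nb false) then
    (PySem.List.pySetD st.1 nb cur, PySem.List.pySetD st.2.1 nb true, st.2.2 ++ [nb])
  else st

-- the 'while queue:' loop; fuel only guards termination (2*n+1 pops always suffice)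
def bfsLoopA (adj_matrix : List (List Int)) (n : Int) :
    Nat → List Int → List Bool → List Int → List Int
  | _, parent, _, [] => parent
  | 0, parent, _, _ => parent
  | fuel+1, parent, reached, current :: queue =>
      let reached1 := PySem.List.pySetD reached current true
      let st := (PySem.List.pyRange 0 n 1).foldl (bfsNeighStep adj_matrix current)
                  (parent, reached1, queue)
      bfsLoopA adj_matrix n fuel st.1 st.2.1 st.2.2

def reference_bfs (adj_matrix : List (List Int)) (root : Int) : List Int :=
  let num_nodes := PySem.List.len adj_matrix
  let parent := PySem.List.pyRange 0 num_nodes 1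
  let parent1 := PySem.List.pySetD parent root root
  let reached := List.replicate adj_matrix.length false
  bfsLoopA adj_matrix num_nodes (2 * adj_matrix.length + 1) parent1 reached [root]

-- ===== PORT B =====
-- pass-1 body: if adj[u][v] == 1 and not discovered[v] and v not in disc: disc[v] = i
def bDiscStep (adj_matrix : List (List Int)) (discovered : List Bool) (i u : Int)
    (d : PySem.Dict Int Int) (v : Int) : PySem.Dict Int Int :=
  if PySem.List.pyGetD (PySem.List.pyGetD adj_matrix u []) v 0 == 1
      && !(PySem.List.pyGetD discovered v false) && !(d.contains v) then
    d.insert v i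
  else d

-- pass 1: 'for i, u in enumerate(level): for v in range(num_nodes): …' building disc
def bDiscover (adj_matrix : List (List Int)) (n : Int) (discovered : List Bool)
    (pairs : List (Int × Int)) (d : PySem.Dict Int Int) : PySem.Dict Int Int :=
  pairs.foldl (fun d iu => (PySem.List.pyRange 0 n 1).foldl (bDiscStep adj_matrix discovered iu.1 iu.2) d) d

-- pass-2 body: if disc.get(v) == i: discovered[v] = True; parent[v] = u; nxt.append(v)
def bCommitStep (d : PySem.Dict Int Int) (i u : Int)
    (st : List Int × List Bool × List Int) (v : Int) : List Int × List Bool × List Int :=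
  if d.get? v == some i then
    (PySem.List.pySetD st.1 v u, PySem.List.pySetD st.2.1 v true, st.2.2 ++ [v])
  else st

-- pass 2: 'for i, u in enumerate(level): for v in range(num_nodes): …' committing the round
def bCommit (n : Int) (d : PySem.Dict Int Int) (pairs : List (Int × Int))
    (st : List Int × List Bool × List Int) : List Int × List Bool × List Int :=
  pairs.foldl (fun st iu => (PySem.List.pyRange 0 n 1).foldl (bCommitStep d iu.1 iu.2) st) st

-- the 'while level:' loop: discover the round, then commit it
def bLoop (adj_matrix : List (List Int)) (n : Int) :
    Nat → List Int → List Bool → List Int → List Int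
  | _, parent, _, [] => parent
  | 0, parent, _, _ => parent
  | fuel+1, parent, discovered, level =>
      let d := bDiscover adj_matrix n discovered (PySem.List.enumerate level) PySem.Dict.empty
      let st := bCommit n d (PySem.List.enumerate level) (parent, discovered, [])
      bLoop adj_matrix n fuel st.1 st.2.1 st.2.2

def reference_bfs_alt (adj_matrix : List (List Int)) (root : Int) : List Int :=
  let num_nodes := PySem.List.len adj_matrix
  let parent1 := PySem.List.pySetD (PySem.List.pyRange 0 num_nodes 1) root root
  let discovered1 := PySem.List.pySetD (List.replicate adj_matrix.length false) root true
  bLoop adj_matrix num_nodes (2 * adj_matrix.length + 1) parent1 discovered1 [root]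

-- ===== PRECONDITION & SPEC =====
-- Pre_ admits any root list(range(n)) can index (negative roots wrap, as in Python, and are
-- covered) and rows of length ≥ n. Outside it A raises IndexError on an out-of-range root or
-- on any visited too-short row; a matrix with a short row on which A happens to return (the
-- short row is never visited) is excluded too: it is not an adjacency matrix, and B returns
-- the same value there anyway.
def Pre_reference_bfs (adj_matrix : List (List Int)) (root : Int) : Prop :=
  -(adj_matrix.length : Int) ≤ root ∧ root < (adj_matrix.length : Int) ∧
    ∀ row ∈ adj_matrix, adj_matrix.length ≤ row.length
instance (adj_matrix : List (List Int)) (root : Int) : Decidable (Pre_reference_bfs adj_matrix root) := by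
  unfold Pre_reference_bfs; infer_instance

def pvWitness_reference_bfs : List (List Int) × Int := ([[0, 1, 0], [1, 0, 1], [0, 1, 0]], 0)

def Spec_reference_bfs (adj_matrix : List (List Int)) (root : Int) (out : List Int) : Prop := out = reference_bfs_alt adj_matrix root
instance (adj_matrix : List (List Int)) (root : Int) (out : List Int) : Decidable (Spec_reference_bfs adj_matrix root out) := by unfold Spec_reference_bfs; infer_instance

-- ===== CLAIM (what is proved, stated in full; the proofs are below) =====
def Claim_equal_reference_bfs : Prop := ∀ (adj_matrix : List (List Int)) (root : Int), Dom_reference_bfs adj_matrix root → Pre_reference_bfs adj_matrix root → Spec_reference_bfs adj_matrix root (reference_bfs adj_matrix root)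

-- ===== LEMMAS AND PROOFS =====

-- proof-side intermediate: the level-synchronous form both loops are reduced to
def bfsLevel (adj : List (List Int)) (n : Int) (frontier : List Int)
    (parent : List Int) (reached : List Bool) : List Int × List Bool × List Int :=
  frontier.foldl (fun st node => (PySem.List.pyRange 0 n 1).foldl (bfsNeighStep adj node) st)
    (parent, reached, ([] : List Int))

def bfsLoopB (adj : List (List Int)) (n : Int) :
    Nat → List Int → List Bool → List Int → List Int
  | _, parent, _, [] => parent
  | 0, parent, _, _ => parent
  | fuel+1, parent, reached, frontier =>
      let st := bfsLevel adj n frontier parent reached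
      bfsLoopB adj n fuel st.1 st.2.1 st.2.2

-- reading back a reached-flag: a nonneg index holding true is in range
lemma getD_true_bounds (r : List Bool) (y : Int) (hy : 0 ≤ y)
    (h : PySem.List.pyGetD r y false = true) :
    y.toNat < r.length ∧ r[y.toNat]? = some true := by
  have hin : y < (r.length : Int) := by
    by_contra hge
    have hn : PySem.List.pyGet? r y = none := by
      rw [PySem.List.pyGet?_eq_none_iff, PySem.Raise.InRange]; omega
    rw [PySem.List.pyGetD_of_none _ _ _ hn] at h
    exact Bool.false_ne_true h
  have hlt : y.toNat < r.length := by omega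
  rw [PySem.List.pyGetD_eq_getElem r false hy hin] at h
  exact ⟨hlt, by rw [List.getElem?_eq_getElem hlt, h]⟩

-- marking cannot unmark: pyGetD stays true under set _ true
lemma getD_true_of_set (r : List Bool) (i : Nat) (y : Int) (hy : 0 ≤ y)
    (h : PySem.List.pyGetD r y false = true) :
    PySem.List.pyGetD (r.set i true) y false = true := by
  have hlen : (r.set i true).length = r.length := by simp
  obtain ⟨hlt, hget⟩ := getD_true_bounds r y hy h
  have hin : y < ((r.set i true).length : Int) := by omega
  rw [PySem.List.pyGetD_eq_getElem _ false hy hin]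
  rcases eq_or_ne i y.toNat with rfl | hne
  · simp
  · rw [List.getElem_set_ne (by omega)]
    exact (List.getElem?_eq_some_iff.mp hget).2

-- writing at a nonneg index, reading it back
lemma pyGetD_pySetD_self {α : Type} (xs : List α) (x : Int) (v d : α)
    (h0 : 0 ≤ x) (h1 : x < (xs.length : Int)) :
    PySem.List.pyGetD (PySem.List.pySetD xs x v) x d = v := by
  rw [PySem.List.pySetD_of_nonneg xs v h0]
  have hin : x < ((xs.set x.toNat v).length : Int) := by simp; omega
  rw [PySem.List.pyGetD_eq_getElem _ d h0 hin]
  rw [List.getElem_set_self]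

-- writing at a nonneg index leaves every other nonneg index unchanged
lemma pyGetD_pySetD_ne {α : Type} (xs : List α) (x y : Int) (v d : α)
    (hx : 0 ≤ x) (hy : 0 ≤ y) (hne : y ≠ x) :
    PySem.List.pyGetD (PySem.List.pySetD xs x v) y d = PySem.List.pyGetD xs y d := by
  rw [PySem.List.pySetD_of_nonneg xs v hx]
  by_cases hin : y < (xs.length : Int)
  · have hin' : y < ((xs.set x.toNat v).length : Int) := by simp; omega
    rw [PySem.List.pyGetD_eq_getElem _ d hy hin', PySem.List.pyGetD_eq_getElem _ d hy hin]
    rw [List.getElem_set_ne (by omega)]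
  · have h1 : PySem.List.pyGet? (xs.set x.toNat v) y = none := by
      rw [PySem.List.pyGet?_eq_none_iff, PySem.Raise.InRange]; simp; omega
    have h2 : PySem.List.pyGet? xs y = none := by
      rw [PySem.List.pyGet?_eq_none_iff, PySem.Raise.InRange]; omega
    rw [PySem.List.pyGetD_of_none _ _ _ h1, PySem.List.pyGetD_of_none _ _ _ h2]

-- the inner-scan fold only appends to the accumulator
lemma foldl_step_acc (adj : List (List Int)) (cur : Int) (L : List Int) :
    ∀ (p : List Int) (r : List Bool) (acc : List Int),
    L.foldl (bfsNeighStep adj cur) (p, r, acc)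
      = ((L.foldl (bfsNeighStep adj cur) (p, r, [])).1,
         (L.foldl (bfsNeighStep adj cur) (p, r, [])).2.1,
         acc ++ (L.foldl (bfsNeighStep adj cur) (p, r, [])).2.2) := by
  induction L with
  | nil => intro p r acc; simp
  | cons x L ih =>
    intro p r acc
    simp only [List.foldl_cons, bfsNeighStep]
    by_cases h : (PySem.List.pyGetD (PySem.List.pyGetD adj cur []) x 0 == 1
        && !(PySem.List.pyGetD r x false)) = true
    · simp only [h, if_true, List.nil_append]
      rw [ih _ _ (acc ++ [x]), ih _ _ [x]]
      simp
    · simp only [h]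
      rw [if_neg, if_neg]
      · exact ih p r acc
      · simp_all
      · simp_all

-- flipping a false entry to true removes exactly one false from the count
lemma count_false_set_true (r : List Bool) (i : Nat) (hi : i < r.length) (h : r[i] = false) :
    (r.set i true).count false + 1 = r.count false := by
  induction r generalizing i with
  | nil => simp at hi
  | cons a l ih =>
    cases i with
    | zero => simp_all
    | succ j =>
      simp only [List.length_cons, Nat.add_lt_add_iff_right] at hi
      simp only [List.getElem_cons_succ] at h
      simp only [List.set, List.count_cons]
      have := ih j hi h
      omega

-- everything the inner scan guarantees: reached-length preserved, the measure
-- 2*#unreached + #appended drops, reached-flags are monotone, appended nodes are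
-- in range and marked reached
lemma scan_props (adj : List (List Int)) (cur : Int) :
    ∀ (L : List Int) (p : List Int) (r : List Bool),
    (∀ x ∈ L, 0 ≤ x ∧ x < (r.length : Int)) →
    ((L.foldl (bfsNeighStep adj cur) (p, r, [])).2.1.length = r.length ∧
     2 * (L.foldl (bfsNeighStep adj cur) (p, r, [])).2.1.count false
       + (L.foldl (bfsNeighStep adj cur) (p, r, [])).2.2.length ≤ 2 * r.count false ∧
     (∀ y : Int, 0 ≤ y → PySem.List.pyGetD r y false = true →
        PySem.List.pyGetD (L.foldl (bfsNeighStep adj cur) (p, r, [])).2.1 y false = true) ∧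
     (∀ x ∈ (L.foldl (bfsNeighStep adj cur) (p, r, [])).2.2,
        0 ≤ x ∧ x < (r.length : Int) ∧
        PySem.List.pyGetD (L.foldl (bfsNeighStep adj cur) (p, r, [])).2.1 x false = true)) := by
  intro L
  induction L with
  | nil => intro p r _; simp
  | cons x L ih =>
    intro p r hL
    obtain ⟨hx0, hxlt⟩ := hL x (List.mem_cons_self ..)
    simp only [List.foldl_cons, bfsNeighStep]
    by_cases h : (PySem.List.pyGetD (PySem.List.pyGetD adj cur []) x 0 == 1
        && !(PySem.List.pyGetD r x false)) = true
    · simp only [h, if_true, List.nil_append]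
      have hgf : PySem.List.pyGetD r x false = false := by
        rcases Bool.and_eq_true_iff.mp h with ⟨_, hnot⟩
        simp at hnot; exact hnot
      have hxnat : x.toNat < r.length := by omega
      have hfalse : r[x.toNat] = false := by
        rw [PySem.List.pyGetD_eq_getElem r false hx0 hxlt] at hgf; exact hgf
      have hsetr : PySem.List.pySetD r x true = r.set x.toNat true :=
        PySem.List.pySetD_of_nonneg r true hx0
      rw [hsetr]
      set p1 := PySem.List.pySetD p x cur with hp1
      set r1 := r.set x.toNat true with hr1
      have hlen1 : r1.length = r.length := by simp [hr1]
      have hcount1 : r1.count false + 1 = r.count false := count_false_set_true r x.toNat hxnat hfalse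
      have hL1 : ∀ z ∈ L, 0 ≤ z ∧ z < (r1.length : Int) := by
        intro z hz; have := hL z (List.mem_cons_of_mem _ hz); omega
      obtain ⟨ihlen, ihcount, ihmono, ihd⟩ := ih p1 r1 hL1
      have hx_r1 : PySem.List.pyGetD r1 x false = true := by
        rw [PySem.List.pyGetD_eq_getElem r1 false hx0 (by omega)]
        simp [hr1]
      rw [foldl_step_acc adj cur L p1 r1 [x]]
      refine ⟨by simpa using (ihlen.trans hlen1), ?_, ?_, ?_⟩
      · simp only [List.length_append, List.length_cons, List.length_nil]
        omega
      · intro y hy hyr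
        exact ihmono y hy (getD_true_of_set r x.toNat y hy hyr)
      · intro z hz
        simp only [List.cons_append, List.nil_append, List.mem_cons] at hz
        rcases hz with rfl | hz
        · exact ⟨hx0, hxlt, ihmono z hx0 hx_r1⟩
        · obtain ⟨hz0, hzlt, hzr⟩ := ihd z hz
          exact ⟨hz0, by omega, hzr⟩
    · simp only [h]
      rw [if_neg (by simp_all)]
      exact ih p r (fun z hz => hL z (List.mem_cons_of_mem _ hz))

-- one whole level also only appends to the accumulator
lemma level_acc (adj : List (List Int)) (n : Int) (F : List Int) :
    ∀ (p : List Int) (r : List Bool) (acc : List Int),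
    F.foldl (fun st node => (PySem.List.pyRange 0 n 1).foldl (bfsNeighStep adj node) st) (p, r, acc)
      = ((bfsLevel adj n F p r).1, (bfsLevel adj n F p r).2.1,
         acc ++ (bfsLevel adj n F p r).2.2) := by
  induction F with
  | nil => intro p r acc; simp [bfsLevel]
  | cons c F ih =>
    intro p r acc
    simp only [bfsLevel, List.foldl_cons]
    rw [foldl_step_acc adj c _ p r acc, foldl_step_acc adj c _ p r []]
    simp only [List.nil_append]
    set X1 := (PySem.List.pyRange 0 n 1).foldl (bfsNeighStep adj c) (p, r, []) with hX1
    rw [ih X1.1 X1.2.1 (acc ++ X1.2.2), ih X1.1 X1.2.1 X1.2.2]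
    simp

-- level-wide version of scan_props
lemma level_props (adj : List (List Int)) (n : Int) :
    ∀ (F : List Int) (p : List Int) (r : List Bool), (r.length : Int) = n →
    ((bfsLevel adj n F p r).2.1.length = r.length ∧
     2 * (bfsLevel adj n F p r).2.1.count false
       + (bfsLevel adj n F p r).2.2.length ≤ 2 * r.count false ∧
     (∀ y : Int, 0 ≤ y → PySem.List.pyGetD r y false = true →
        PySem.List.pyGetD (bfsLevel adj n F p r).2.1 y false = true) ∧
     (∀ x ∈ (bfsLevel adj n F p r).2.2,
        0 ≤ x ∧ x < n ∧ PySem.List.pyGetD (bfsLevel adj n F p r).2.1 x false = true)) := by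
  intro F
  induction F with
  | nil => intro p r hn; simp [bfsLevel]
  | cons c F ih =>
    intro p r hn
    have hrange : ∀ x ∈ PySem.List.pyRange 0 n 1, 0 ≤ x ∧ x < (r.length : Int) := by
      intro x hx
      have := PySem.List.mem_pyRange_one.mp hx
      omega
    obtain ⟨slen, scount, smono, sd⟩ := scan_props adj c (PySem.List.pyRange 0 n 1) p r hrange
    have hlvl : bfsLevel adj n (c :: F) p r
        = ((bfsLevel adj n F ((PySem.List.pyRange 0 n 1).foldl (bfsNeighStep adj c) (p, r, [])).1
              ((PySem.List.pyRange 0 n 1).foldl (bfsNeighStep adj c) (p, r, [])).2.1).1,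
           (bfsLevel adj n F ((PySem.List.pyRange 0 n 1).foldl (bfsNeighStep adj c) (p, r, [])).1
              ((PySem.List.pyRange 0 n 1).foldl (bfsNeighStep adj c) (p, r, [])).2.1).2.1,
           ((PySem.List.pyRange 0 n 1).foldl (bfsNeighStep adj c) (p, r, [])).2.2
             ++ (bfsLevel adj n F ((PySem.List.pyRange 0 n 1).foldl (bfsNeighStep adj c) (p, r, [])).1
              ((PySem.List.pyRange 0 n 1).foldl (bfsNeighStep adj c) (p, r, [])).2.1).2.2) := by
      simp only [bfsLevel, List.foldl_cons]
      rw [level_acc adj n F _ _ _]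
      simp [bfsLevel]
    set X1 := (PySem.List.pyRange 0 n 1).foldl (bfsNeighStep adj c) (p, r, []) with hX1
    obtain ⟨ilen, icount, imono, id'⟩ := ih X1.1 X1.2.1 (by omega)
    rw [hlvl]
    refine ⟨by simpa using ilen.trans slen, ?_, ?_, ?_⟩
    · simp only [List.length_append]; omega
    · intro y hy hyr
      exact imono y hy (smono y hy hyr)
    · intro z hz
      simp only [List.mem_append] at hz
      rcases hz with hz | hz
      · obtain ⟨hz0, hzlt, hzr⟩ := sd z hz
        exact ⟨hz0, by omega, imono z hz0 hzr⟩
      · exact id' z hz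

-- definitional equations of the two loops
lemma loopA_nil (adj : List (List Int)) (n : Int) (f : Nat) (p : List Int) (r : List Bool) :
    bfsLoopA adj n f p r [] = p := by cases f <;> rfl
lemma loopB_nil (adj : List (List Int)) (n : Int) (f : Nat) (p : List Int) (r : List Bool) :
    bfsLoopB adj n f p r [] = p := by cases f <;> rfl

-- writing true over an already-true flag changes nothing
lemma pySetD_true_self (r : List Bool) (c : Int) (hc : 0 ≤ c)
    (h : PySem.List.pyGetD r c false = true) : PySem.List.pySetD r c true = r := by
  obtain ⟨hlt, hget⟩ := getD_true_bounds r c hc h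
  rw [PySem.List.pySetD_of_nonneg r true hc]
  apply List.ext_getElem (by simp)
  intro j h1 h2
  rcases eq_or_ne j c.toNat with rfl | hne
  · simpa using (List.getElem?_eq_some_iff.mp hget).2
  · rw [List.getElem_set_ne (by omega)]

-- unfolding a level at a cons
lemma bfsLevel_cons (adj : List (List Int)) (n c : Int) (F : List Int)
    (p : List Int) (r : List Bool) :
    bfsLevel adj n (c :: F) p r
      = ((bfsLevel adj n F ((PySem.List.pyRange 0 n 1).foldl (bfsNeighStep adj c) (p, r, [])).1
            ((PySem.List.pyRange 0 n 1).foldl (bfsNeighStep adj c) (p, r, [])).2.1).1,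
         (bfsLevel adj n F ((PySem.List.pyRange 0 n 1).foldl (bfsNeighStep adj c) (p, r, [])).1
            ((PySem.List.pyRange 0 n 1).foldl (bfsNeighStep adj c) (p, r, [])).2.1).2.1,
         ((PySem.List.pyRange 0 n 1).foldl (bfsNeighStep adj c) (p, r, [])).2.2
           ++ (bfsLevel adj n F ((PySem.List.pyRange 0 n 1).foldl (bfsNeighStep adj c) (p, r, [])).1
            ((PySem.List.pyRange 0 n 1).foldl (bfsNeighStep adj c) (p, r, [])).2.1).2.2) := by
  simp only [bfsLevel, List.foldl_cons]
  rw [foldl_step_acc adj c _ p r []]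
  simp only [List.nil_append]
  rw [level_acc adj n F _ _ _]
  simp only [bfsLevel]

-- FIFO processing of a block of already-reached nodes equals one whole level
lemma loopA_level (adj : List (List Int)) (n : Int) :
    ∀ (cur : List Int) (f : Nat) (p : List Int) (r : List Bool) (nxt : List Int),
    (∀ c ∈ cur, 0 ≤ c ∧ PySem.List.pyGetD r c false = true) →
    (r.length : Int) = n →
    bfsLoopA adj n (cur.length + f) p r (cur ++ nxt)
      = bfsLoopA adj n f (bfsLevel adj n cur p r).1 (bfsLevel adj n cur p r).2.1
          (nxt ++ (bfsLevel adj n cur p r).2.2) := by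
  intro cur
  induction cur with
  | nil => intro f p r nxt _ _; simp [bfsLevel]
  | cons c cur ih =>
    intro f p r nxt hcur hn
    obtain ⟨hc0, hcr⟩ := hcur c (List.mem_cons_self ..)
    have hrange : ∀ x ∈ PySem.List.pyRange 0 n 1, 0 ≤ x ∧ x < (r.length : Int) := by
      intro x hx; have := PySem.List.mem_pyRange_one.mp hx; omega
    obtain ⟨slen, _, smono, _⟩ := scan_props adj c (PySem.List.pyRange 0 n 1) p r hrange
    have hstep : (c :: cur).length + f = (cur.length + f) + 1 := by simp; omega
    rw [hstep]
    show bfsLoopA adj n ((cur.length + f) + 1) p r (c :: (cur ++ nxt)) = _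
    rw [show bfsLoopA adj n ((cur.length + f) + 1) p r (c :: (cur ++ nxt))
        = (bfsLoopA adj n (cur.length + f)
            ((PySem.List.pyRange 0 n 1).foldl (bfsNeighStep adj c) (p, PySem.List.pySetD r c true, cur ++ nxt)).1
            ((PySem.List.pyRange 0 n 1).foldl (bfsNeighStep adj c) (p, PySem.List.pySetD r c true, cur ++ nxt)).2.1
            ((PySem.List.pyRange 0 n 1).foldl (bfsNeighStep adj c) (p, PySem.List.pySetD r c true, cur ++ nxt)).2.2)
        from rfl]
    rw [pySetD_true_self r c hc0 hcr]
    rw [foldl_step_acc adj c _ p r (cur ++ nxt)]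
    set X1 := (PySem.List.pyRange 0 n 1).foldl (bfsNeighStep adj c) (p, r, []) with hX1
    have hcur1 : ∀ c' ∈ cur, 0 ≤ c' ∧ PySem.List.pyGetD X1.2.1 c' false = true := by
      intro c' hc'
      obtain ⟨h0, hr'⟩ := hcur c' (List.mem_cons_of_mem _ hc')
      exact ⟨h0, smono c' h0 hr'⟩
    rw [show cur ++ nxt ++ X1.2.2 = cur ++ (nxt ++ X1.2.2) from by simp]
    rw [ih f X1.1 X1.2.1 (nxt ++ X1.2.2) hcur1 (by omega)]
    rw [bfsLevel_cons]
    simp only [← hX1, List.append_assoc]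

-- main bridge: with enough fuel on both sides, FIFO BFS = level-synchronous BFS
lemma loopA_eq_loopB (adj : List (List Int)) (n : Int) :
    ∀ (f2 f1 : Nat) (p : List Int) (r : List Bool) (q : List Int),
    (r.length : Int) = n →
    (∀ c ∈ q, 0 ≤ c ∧ PySem.List.pyGetD r c false = true) →
    2 * r.count false + q.length ≤ f1 →
    2 * r.count false + q.length ≤ f2 →
    bfsLoopA adj n f1 p r q = bfsLoopB adj n f2 p r q := by
  intro f2
  induction f2 with
  | zero =>
    intro f1 p r q hn hq h1 h2
    have : q = [] := by
      cases q with
      | nil => rfl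
      | cons a l => simp at h2
    subst this
    rw [loopA_nil, loopB_nil]
  | succ f2 ih =>
    intro f1 p r q hn hq h1 h2
    cases q with
    | nil => rw [loopA_nil, loopB_nil]
    | cons c rest =>
      have hlen : (c :: rest).length ≤ f1 := by simp at h1 ⊢; omega
      have hf1 : f1 = (c :: rest).length + (f1 - (c :: rest).length) := by omega
      have hdec := loopA_level adj n (c :: rest) (f1 - (c :: rest).length) p r [] hq hn
      simp only [List.append_nil, List.nil_append] at hdec
      rw [hf1, hdec]
      obtain ⟨llen, lcount, _, ld⟩ := level_props adj n (c :: rest) p r hn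
      have hB : bfsLoopB adj n (f2 + 1) p r (c :: rest)
          = bfsLoopB adj n f2 (bfsLevel adj n (c :: rest) p r).1
              (bfsLevel adj n (c :: rest) p r).2.1 (bfsLevel adj n (c :: rest) p r).2.2 := rfl
      rw [hB]
      apply ih
      · omega
      · intro x hx
        obtain ⟨h0, _, hr⟩ := ld x hx
        exact ⟨h0, hr⟩
      · have := h1; simp only [List.length_cons] at h1 ⊢; omega
      · simp only [List.length_cons] at h2 ⊢; omega

-- Python negative-index write: xs[i] = v for -len ≤ i < 0
lemma pySetD_neg_eq_set (xs : List Bool) (i : Int) (v : Bool)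
    (hle : -(xs.length : Int) ≤ i) (hlt : i < 0) :
    PySem.List.pySetD xs i v = xs.set ((xs.length : Int) + i).toNat v := by
  simp only [PySem.List.pySetD, PySem.List.pySet?, PySem.List.pyIdx?]
  rw [if_neg (by omega), if_pos hle]
  simp only [Option.map_some, Option.getD_some]
  congr 1
  omega

-- ===== new lemmas: the staged gather/commit rounds equal the level-synchronous form =====

-- a disc row fold never changes an existing entry
lemma disc_row_mono (adj : List (List Int)) (rb : List Bool) (k u : Int) :
    ∀ (L : List Int) (d : PySem.Dict Int Int) (v : Int) (w : Int),
    d.get? v = some w → (L.foldl (bDiscStep adj rb k u) d).get? v = some w := by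
  intro L
  induction L with
  | nil => intro d v w h; simpa using h
  | cons x L ih =>
    intro d v w h
    simp only [List.foldl_cons, bDiscStep]
    split
    · rename_i hc
      apply ih
      rcases eq_or_ne v x with rfl | hne
      · exfalso
        have : d.contains v = false := by
          rcases Bool.and_eq_true_iff.mp hc with ⟨_, h2⟩
          simpa using h2
        rw [PySem.Dict.contains_eq_isSome_get?, h] at this
        simp at this
      · rw [PySem.Dict.get?_insert_of_ne _ _ hne, h]
    · exact ih d v w h

-- every entry of a disc row fold is an old entry or carries the row index
lemma disc_row_val (adj : List (List Int)) (rb : List Bool) (k u : Int) :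
    ∀ (L : List Int) (d : PySem.Dict Int Int) (v : Int) (w : Int),
    (L.foldl (bDiscStep adj rb k u) d).get? v = some w → d.get? v = some w ∨ w = k := by
  intro L
  induction L with
  | nil => intro d v w h; exact Or.inl (by simpa using h)
  | cons x L ih =>
    intro d v w h
    simp only [List.foldl_cons, bDiscStep] at h
    by_cases hc : (PySem.List.pyGetD (PySem.List.pyGetD adj u []) x 0 == 1
        && !(PySem.List.pyGetD rb x false) && !(d.contains x)) = true
    · rw [if_pos hc] at h
      rcases ih _ v w h with hold | hk
      · rcases eq_or_ne v x with rfl | hne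
        · rw [PySem.Dict.get?_insert_self] at hold
          exact Or.inr (by simpa using hold.symm)
        · rw [PySem.Dict.get?_insert_of_ne _ _ hne] at hold
          exact Or.inl hold
      · exact Or.inr hk
    · rw [if_neg hc] at h
      exact ih d v w h

-- a fresh key after a disc row fold: exactly the row's new discoveries, valued k
lemma disc_row_new (adj : List (List Int)) (rb : List Bool) (k u : Int) :
    ∀ (L : List Int) (d : PySem.Dict Int Int) (v : Int), d.get? v = none →
    (L.foldl (bDiscStep adj rb k u) d).get? v
      = if v ∈ L ∧ (PySem.List.pyGetD (PySem.List.pyGetD adj u []) v 0 == 1) = true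
            ∧ PySem.List.pyGetD rb v false = false then some k else none := by
  intro L
  induction L with
  | nil => intro d v h; simpa using h
  | cons x L ih =>
    intro d v h
    simp only [List.foldl_cons, bDiscStep]
    by_cases hc : (PySem.List.pyGetD (PySem.List.pyGetD adj u []) x 0 == 1
        && !(PySem.List.pyGetD rb x false) && !(d.contains x)) = true
    · rw [if_pos hc]
      rcases eq_or_ne v x with rfl | hne
      · have hval : (d.insert v k).get? v = some k := PySem.Dict.get?_insert_self ..
        have := disc_row_mono adj rb k u L (d.insert v k) v k hval
        rw [this, if_pos]
        refine ⟨List.mem_cons_self .., ?_, ?_⟩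
        · rcases Bool.and_eq_true_iff.mp hc with ⟨h1, _⟩
          exact (Bool.and_eq_true_iff.mp h1).1
        · rcases Bool.and_eq_true_iff.mp hc with ⟨h1, _⟩
          have := (Bool.and_eq_true_iff.mp h1).2
          simpa using this
      · rw [ih (d.insert x k) v (by rw [PySem.Dict.get?_insert_of_ne _ _ hne]; exact h)]
        congr 1
        · simp [List.mem_cons, hne]
    · rw [if_neg hc]
      rw [ih d v h]
      rcases eq_or_ne v x with rfl | hne
      · have hnc : d.contains v = false := by
          rw [PySem.Dict.contains_eq_isSome_get?, h]; rfl
        by_cases hm : v ∈ L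
        · simp [hm]
        · have : ¬ ((PySem.List.pyGetD (PySem.List.pyGetD adj u []) v 0 == 1) = true
              ∧ PySem.List.pyGetD rb v false = false) := by
            intro ⟨h1, h2⟩
            apply hc
            simp [h1, h2, hnc]
          simp only [List.mem_cons, hm, or_false]
          rw [if_neg (by tauto), if_neg (by tauto)]
      · congr 1
        simp [List.mem_cons, hne]

-- bDiscover never changes an existing entry
lemma discover_mono (adj : List (List Int)) (n : Int) (rb : List Bool) :
    ∀ (pairs : List (Int × Int)) (d : PySem.Dict Int Int) (v w : Int),
    d.get? v = some w → (bDiscover adj n rb pairs d).get? v = some w := by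
  intro pairs
  induction pairs with
  | nil => intro d v w h; simpa [bDiscover] using h
  | cons iu rest ih =>
    intro d v w h
    simp only [bDiscover, List.foldl_cons]
    exact ih _ v w (disc_row_mono adj rb iu.1 iu.2 _ d v w h)

-- every entry of bDiscover is an old entry or carries one of the pair indices
lemma discover_val (adj : List (List Int)) (n : Int) (rb : List Bool) :
    ∀ (pairs : List (Int × Int)) (d : PySem.Dict Int Int) (v w : Int),
    (bDiscover adj n rb pairs d).get? v = some w →
    d.get? v = some w ∨ w ∈ pairs.map (·.1) := by
  intro pairs
  induction pairs with
  | nil => intro d v w h; exact Or.inl (by simpa [bDiscover] using h)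
  | cons iu rest ih =>
    intro d v w h
    simp only [bDiscover, List.foldl_cons] at h
    rcases ih _ v w h with hrow | hmem
    · rcases disc_row_val adj rb iu.1 iu.2 _ d v w hrow with hold | hk
      · exact Or.inl hold
      · exact Or.inr (by simp [hk])
    · exact Or.inr (by simp [hmem])

-- commit block = scatter block, given the dict decides exactly the scatter condition
lemma commit_block_eq (adj : List (List Int)) (D : PySem.Dict Int Int) (k u : Int) :
    ∀ (L : List Int), L.Pairwise (· ≠ ·) → (∀ x ∈ L, 0 ≤ x) →
    ∀ (p : List Int) (rc : List Bool) (acc : List Int),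
    (∀ v ∈ L, (D.get? v == some k)
        = (PySem.List.pyGetD (PySem.List.pyGetD adj u []) v 0 == 1
            && !(PySem.List.pyGetD rc v false))) →
    L.foldl (bCommitStep D k u) (p, rc, acc) = L.foldl (bfsNeighStep adj u) (p, rc, acc) := by
  intro L
  induction L with
  | nil => intro _ _ p rc acc _; rfl
  | cons x L ih =>
    intro hnd hpos p rc acc hcond
    have hx0 : (0:Int) ≤ x := hpos x (List.mem_cons_self ..)
    have hx := hcond x (List.mem_cons_self ..)
    simp only [List.foldl_cons, bCommitStep, bfsNeighStep, hx]
    by_cases hc : (PySem.List.pyGetD (PySem.List.pyGetD adj u []) x 0 == 1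
        && !(PySem.List.pyGetD rc x false)) = true
    · rw [if_pos hc]
      apply ih hnd.of_cons (fun z hz => hpos z (List.mem_cons_of_mem _ hz))
      intro v hv
      have hvne : v ≠ x := (List.pairwise_cons.mp hnd).1 v hv |>.symm
      rw [hcond v (List.mem_cons_of_mem _ hv)]
      rw [pyGetD_pySetD_ne rc x v true false hx0 (hpos v (List.mem_cons_of_mem _ hv)) hvne]
    · rw [if_neg hc]
      exact ih hnd.of_cons (fun z hz => hpos z (List.mem_cons_of_mem _ hz)) p rc acc
        (fun v hv => hcond v (List.mem_cons_of_mem _ hv))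

-- after one scatter block, the reached flags are the base flags plus the dict after one disc row
lemma link_fold (adj : List (List Int)) (rb : List Bool) (k u : Int) :
    ∀ (L : List Int), L.Pairwise (· ≠ ·) →
    ∀ (p : List Int) (rc : List Bool) (acc : List Int) (d : PySem.Dict Int Int),
    (∀ x ∈ L, 0 ≤ x ∧ x < (rc.length : Int)) →
    (∀ v : Int, 0 ≤ v → PySem.List.pyGetD rc v false
        = (PySem.List.pyGetD rb v false || (d.get? v).isSome)) →
    ∀ v : Int, 0 ≤ v →
      PySem.List.pyGetD (L.foldl (bfsNeighStep adj u) (p, rc, acc)).2.1 v false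
        = (PySem.List.pyGetD rb v false || ((L.foldl (bDiscStep adj rb k u) d).get? v).isSome) := by
  intro L
  induction L with
  | nil => intro _ p rc acc d _ hl v hv; exact hl v hv
  | cons x L ih =>
    intro hnd p rc acc d hb hl v hv
    obtain ⟨hx0, hxlt⟩ := hb x (List.mem_cons_self ..)
    have hcondeq : (PySem.List.pyGetD (PySem.List.pyGetD adj u []) x 0 == 1
          && !(PySem.List.pyGetD rb x false) && !(d.contains x))
        = (PySem.List.pyGetD (PySem.List.pyGetD adj u []) x 0 == 1
          && !(PySem.List.pyGetD rc x false)) := by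
      rw [hl x hx0, PySem.Dict.contains_eq_isSome_get?]
      cases PySem.List.pyGetD (PySem.List.pyGetD adj u []) x 0 == 1 <;>
        cases PySem.List.pyGetD rb x false <;> cases (d.get? x).isSome <;> simp
    simp only [List.foldl_cons, bfsNeighStep, bDiscStep, hcondeq]
    by_cases hc : (PySem.List.pyGetD (PySem.List.pyGetD adj u []) x 0 == 1
        && !(PySem.List.pyGetD rc x false)) = true
    · simp only [if_pos hc]
      refine ih hnd.of_cons (PySem.List.pySetD p x u) (PySem.List.pySetD rc x true)
        (acc ++ [x]) (d.insert x k) ?_ ?_ v hv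
      · intro z hz
        obtain ⟨h0, hlt⟩ := hb z (List.mem_cons_of_mem _ hz)
        rw [PySem.List.length_pySetD]
        exact ⟨h0, hlt⟩
      · intro y hy0
        rcases eq_or_ne y x with rfl | hne
        · rw [pyGetD_pySetD_self rc y true false hy0 hxlt]
          rw [PySem.Dict.get?_insert_self]
          simp
        · rw [pyGetD_pySetD_ne rc x y true false hx0 hy0 hne]
          rw [PySem.Dict.get?_insert_of_ne _ _ hne]
          exact hl y hy0
    · simp only [if_neg hc]
      exact ih hnd.of_cons p rc acc d (fun z hz => hb z (List.mem_cons_of_mem _ hz)) hl v hv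

-- the heart of the proof: discover-then-commit from position k equals the scatter rounds
lemma commit_eq_scatter (adj : List (List Int)) (n : Int) (rb : List Bool) :
    ∀ (F : List Int) (k : Int) (d0 : PySem.Dict Int Int)
      (p : List Int) (rc : List Bool) (acc : List Int),
    (∀ v w : Int, d0.get? v = some w → w < k) →
    ((rc.length : Int) = n) →
    (∀ v : Int, 0 ≤ v → PySem.List.pyGetD rc v false
        = (PySem.List.pyGetD rb v false || (d0.get? v).isSome)) →
    bCommit n (bDiscover adj n rb (PySem.List.enumerate F k) d0)
        (PySem.List.enumerate F k) (p, rc, acc)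
      = F.foldl (fun st node => (PySem.List.pyRange 0 n 1).foldl (bfsNeighStep adj node) st)
          (p, rc, acc) := by
  intro F
  induction F with
  | nil =>
    intro k d0 p rc acc _ _ _
    simp [bDiscover, bCommit, PySem.List.enumerate_nil]
  | cons u F ih =>
    intro k d0 p rc acc hlt hlen hlink
    rw [PySem.List.enumerate_cons]
    have hpw : (PySem.List.pyRange 0 n 1).Pairwise (· ≠ ·) :=
      PySem.List.nodup_pyRange_one 0 n
    have hpos : ∀ x ∈ PySem.List.pyRange 0 n 1, (0:Int) ≤ x := by
      intro x hx; exact (PySem.List.mem_pyRange_one.mp hx).1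
    have hbnd : ∀ x ∈ PySem.List.pyRange 0 n 1, (0:Int) ≤ x ∧ x < (rc.length : Int) := by
      intro x hx; have := PySem.List.mem_pyRange_one.mp hx; omega
    set d1 := (PySem.List.pyRange 0 n 1).foldl (bDiscStep adj rb k u) d0 with hd1
    have hDrw : bDiscover adj n rb ((k, u) :: PySem.List.enumerate F (k + 1)) d0
        = bDiscover adj n rb (PySem.List.enumerate F (k + 1)) d1 := rfl
    set D := bDiscover adj n rb (PySem.List.enumerate F (k + 1)) d1 with hD
    have hiff : ∀ v ∈ PySem.List.pyRange 0 n 1, (D.get? v = some k ↔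
        (PySem.List.pyGetD (PySem.List.pyGetD adj u []) v 0 == 1) = true
          ∧ PySem.List.pyGetD rc v false = false) := by
      intro v hv
      have hv0 : (0:Int) ≤ v := (PySem.List.mem_pyRange_one.mp hv).1
      constructor
      · intro h
        rcases discover_val adj n rb _ d1 v k h with h1 | h1
        · rcases h0 : d0.get? v with _ | w
          · rw [disc_row_new adj rb k u _ d0 v h0] at h1
            split at h1
            · rename_i hcnd
              refine ⟨hcnd.2.1, ?_⟩
              rw [hlink v hv0, h0, hcnd.2.2]; rfl
            · exact absurd h1 (by simp)
          · have := disc_row_mono adj rb k u (PySem.List.pyRange 0 n 1) d0 v w h0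
            rw [← hd1] at this
            rw [this] at h1
            have hwk : w = k := by simpa using h1
            exact absurd (hlt v w h0) (by omega)
        · exfalso
          rw [show (PySem.List.enumerate F (k+1)).map (·.1)
              = PySem.List.pyRange (k+1) (k+1 + F.length) 1
            from PySem.List.map_fst_enumerate F (k+1)] at h1
          have := PySem.List.mem_pyRange_one.mp h1
          omega
      · intro ⟨hed, hrc⟩
        have h0 : d0.get? v = none := by
          rw [hlink v hv0] at hrc
          rcases h : d0.get? v with _ | w
          · rfl
          · rw [h] at hrc; simp at hrc
        have hrb : PySem.List.pyGetD rb v false = false := by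
          rw [hlink v hv0, h0] at hrc
          simpa using hrc
        have h1 : d1.get? v = some k := by
          rw [hd1, disc_row_new adj rb k u _ d0 v h0, if_pos ⟨hv, hed, hrb⟩]
        exact discover_mono adj n rb _ d1 v k h1
    have hcond : ∀ v ∈ PySem.List.pyRange 0 n 1, (D.get? v == some k)
        = (PySem.List.pyGetD (PySem.List.pyGetD adj u []) v 0 == 1
            && !(PySem.List.pyGetD rc v false)) := by
      intro v hv
      by_cases hP : (PySem.List.pyGetD (PySem.List.pyGetD adj u []) v 0 == 1) = true
          ∧ PySem.List.pyGetD rc v false = false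
      · rw [(hiff v hv).mpr hP, hP.1, hP.2]
        simp
      · have hne : D.get? v ≠ some k := fun h => hP ((hiff v hv).mp h)
        have hfalse : (D.get? v == some k) = false := by
          simpa using hne
        rw [hfalse]
        rcases hed : (PySem.List.pyGetD (PySem.List.pyGetD adj u []) v 0 == 1) with _ | _
          <;> rcases hrc : PySem.List.pyGetD rc v false with _ | _ <;> simp_all
    have hblk : (PySem.List.pyRange 0 n 1).foldl (bCommitStep D k u) (p, rc, acc)
        = (PySem.List.pyRange 0 n 1).foldl (bfsNeighStep adj u) (p, rc, acc) :=
      commit_block_eq adj D k u _ hpw hpos p rc acc hcond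
    have hcommit : bCommit n D ((k, u) :: PySem.List.enumerate F (k + 1)) (p, rc, acc)
        = bCommit n D (PySem.List.enumerate F (k + 1))
            ((PySem.List.pyRange 0 n 1).foldl (bfsNeighStep adj u) (p, rc, acc)) := by
      simp only [bCommit, List.foldl_cons]
      rw [hblk]
    rw [hDrw, hcommit]
    set st1 := (PySem.List.pyRange 0 n 1).foldl (bfsNeighStep adj u) (p, rc, acc) with hst1
    have hlen1 : (st1.2.1.length : Int) = n := by
      rw [hst1, foldl_step_acc adj u _ p rc acc]
      dsimp only
      obtain ⟨l1, _, _, _⟩ := scan_props adj u (PySem.List.pyRange 0 n 1) p rc hbnd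
      rw [l1]
      exact hlen
    have hlt1 : ∀ v w : Int, d1.get? v = some w → w < k + 1 := by
      intro v w h
      rcases disc_row_val adj rb k u _ d0 v w h with h1 | h1
      · have := hlt v w h1; omega
      · omega
    have hlink1 : ∀ v : Int, 0 ≤ v → PySem.List.pyGetD st1.2.1 v false
        = (PySem.List.pyGetD rb v false || (d1.get? v).isSome) := by
      intro v hv0
      rw [hst1]
      exact link_fold adj rb k u _ hpw p rc acc d0 hbnd hlink v hv0
    have hIH := ih (k + 1) d1 st1.1 st1.2.1 st1.2.2 hlt1 hlen1 hlink1
    rw [List.foldl_cons, ← hst1]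
    calc bCommit n D (PySem.List.enumerate F (k + 1)) st1
        = bCommit n D (PySem.List.enumerate F (k + 1)) (st1.1, st1.2.1, st1.2.2) := rfl
      _ = F.foldl (fun st node => (PySem.List.pyRange 0 n 1).foldl (bfsNeighStep adj node) st)
            (st1.1, st1.2.1, st1.2.2) := hIH
      _ = F.foldl (fun st node => (PySem.List.pyRange 0 n 1).foldl (bfsNeighStep adj node) st)
            st1 := rfl

-- B's while loop equals the level-synchronous loop
lemma bLoop_eq_loopB (adj : List (List Int)) (n : Int) :
    ∀ (f : Nat) (p : List Int) (r : List Bool) (lvl : List Int),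
    (r.length : Int) = n →
    bLoop adj n f p r lvl = bfsLoopB adj n f p r lvl := by
  intro f
  induction f with
  | zero => intro p r lvl _; cases lvl <;> rfl
  | succ f ih =>
    intro p r lvl hlen
    cases lvl with
    | nil => rfl
    | cons c rest =>
      have hlv : bCommit n (bDiscover adj n r (PySem.List.enumerate (c :: rest)) PySem.Dict.empty)
            (PySem.List.enumerate (c :: rest)) (p, r, [])
          = bfsLevel adj n (c :: rest) p r :=
        commit_eq_scatter adj n r (c :: rest) 0 PySem.Dict.empty p r []
          (by intro v w h; rw [PySem.Dict.get?_empty] at h; cases h)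
          hlen
          (by intro v _; rw [PySem.Dict.get?_empty]; simp)
      rw [show bLoop adj n (f + 1) p r (c :: rest)
          = bLoop adj n f
              (bCommit n (bDiscover adj n r (PySem.List.enumerate (c :: rest)) PySem.Dict.empty)
                (PySem.List.enumerate (c :: rest)) (p, r, [])).1
              (bCommit n (bDiscover adj n r (PySem.List.enumerate (c :: rest)) PySem.Dict.empty)
                (PySem.List.enumerate (c :: rest)) (p, r, [])).2.1
              (bCommit n (bDiscover adj n r (PySem.List.enumerate (c :: rest)) PySem.Dict.empty)
                (PySem.List.enumerate (c :: rest)) (p, r, [])).2.2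
          from rfl]
      rw [hlv]
      rw [show bfsLoopB adj n (f + 1) p r (c :: rest)
          = bfsLoopB adj n f (bfsLevel adj n (c :: rest) p r).1
              (bfsLevel adj n (c :: rest) p r).2.1 (bfsLevel adj n (c :: rest) p r).2.2
          from rfl]
      apply ih
      obtain ⟨l1, _, _, _⟩ := level_props adj n (c :: rest) p r hlen
      rw [l1]
      exact hlen

-- both mains equal the level-synchronous loop started from the common initial state
lemma reference_bfs_eq_sync (adj : List (List Int)) (root : Int)
    (h0 : -(adj.length : Int) ≤ root) (h1 : root < (adj.length : Int)) :
    reference_bfs adj root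
      = bfsLoopB adj (PySem.List.len adj) (2 * adj.length + 1)
          (PySem.List.pySetD (PySem.List.pyRange 0 (PySem.List.len adj) 1) root root)
          (PySem.List.pySetD (List.replicate adj.length false) root true) [root] := by
  simp only [reference_bfs]
  set n := PySem.List.len adj with hn
  have hnval : n = (adj.length : Int) := by simp [hn]
  set p1 := PySem.List.pySetD (PySem.List.pyRange 0 n 1) root root with hp1
  set r1 := PySem.List.pySetD (List.replicate adj.length false) root true with hr1
  have hex : ∃ j, j < adj.length ∧ r1 = (List.replicate adj.length false).set j true := by
    rcases le_or_gt 0 root with hs | hs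
    · exact ⟨root.toNat, by omega,
        by rw [hr1, PySem.List.pySetD_of_nonneg _ true hs]⟩
    · refine ⟨((adj.length : Int) + root).toNat, by omega, ?_⟩
      rw [hr1, pySetD_neg_eq_set _ root true (by simpa using h0) hs]
      simp
  obtain ⟨j, hj, hr1eq⟩ := hex
  have hr1len : r1.length = adj.length := by rw [hr1eq]; simp
  have hcount1 : r1.count false + 1 = adj.length := by
    rw [hr1eq]
    have := count_false_set_true (List.replicate adj.length false) j
      (by simpa using hj) (by simp)
    simpa using this
  have hA : bfsLoopA adj n (2 * adj.length + 1) p1 (List.replicate adj.length false) [root]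
      = bfsLoopA adj n (2 * adj.length)
          ((PySem.List.pyRange 0 n 1).foldl (bfsNeighStep adj root) (p1, r1, [])).1
          ((PySem.List.pyRange 0 n 1).foldl (bfsNeighStep adj root) (p1, r1, [])).2.1
          ((PySem.List.pyRange 0 n 1).foldl (bfsNeighStep adj root) (p1, r1, [])).2.2 := rfl
  have hB : bfsLoopB adj n (2 * adj.length + 1) p1 r1 [root]
      = bfsLoopB adj n (2 * adj.length)
          ((PySem.List.pyRange 0 n 1).foldl (bfsNeighStep adj root) (p1, r1, [])).1
          ((PySem.List.pyRange 0 n 1).foldl (bfsNeighStep adj root) (p1, r1, [])).2.1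
          ((PySem.List.pyRange 0 n 1).foldl (bfsNeighStep adj root) (p1, r1, [])).2.2 := rfl
  rw [hA, hB]
  have hrange : ∀ x ∈ PySem.List.pyRange 0 n 1, 0 ≤ x ∧ x < (r1.length : Int) := by
    intro x hx
    have := PySem.List.mem_pyRange_one.mp hx
    omega
  obtain ⟨slen, scount, _, sd⟩ := scan_props adj root (PySem.List.pyRange 0 n 1) p1 r1 hrange
  apply loopA_eq_loopB
  · rw [slen]; omega
  · intro c hc
    obtain ⟨hc0, _, hcr⟩ := sd c hc
    exact ⟨hc0, hcr⟩
  · omega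
  · omega

lemma alt_eq_sync (adj : List (List Int)) (root : Int) :
    reference_bfs_alt adj root
      = bfsLoopB adj (PySem.List.len adj) (2 * adj.length + 1)
          (PySem.List.pySetD (PySem.List.pyRange 0 (PySem.List.len adj) 1) root root)
          (PySem.List.pySetD (List.replicate adj.length false) root true) [root] := by
  simp only [reference_bfs_alt]
  apply bLoop_eq_loopB
  simp [PySem.List.len, PySem.List.length_pySetD]

-- ===== VERDICT (by name: the statement is the Claim_ definition above) =====
theorem reference_bfs_spec : Claim_equal_reference_bfs := by
  intro adj_matrix root _ hpre
  obtain ⟨h0, h1, _⟩ := hpre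
  unfold Spec_reference_bfs
  rw [reference_bfs_eq_sync adj_matrix root h0 h1, alt_eq_sync]
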